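-- pv_equiv track=rewrite | github.com/Elyseum/AdventOfCode | 2017/Day10.py | knot_hash
-- ===== SOURCE A (Python) =====
-- def reverse(numbers, start_pos, length):
--     """Cyclic reverse in sublist of length starting at start_pos"""
--     list_length = len(numbers)
--     length = min([list_length, length])
--
--     switch_length = int(length / 2)
--     for index_to_switch in range(switch_length):
--         to_switch = (start_pos + index_to_switch) % list_length
--         switch = (start_pos + length - 1 - index_to_switch) % list_length
--         numbers[to_switch], numbers[switch] = numbers[switch], numbers[to_switch]
--     return numbers
--
-- def knot_hash(numbers, reverse_lengths, iterations=1):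
--     """Apply knot hash to list of numbers for given iterations."""
--     start_pos = 0
--     skip_size = 0
--     numbers_length = len(numbers)
--     for _ in range(iterations):
--         for reverse_length in reverse_lengths:
--             reverse(numbers, start_pos, reverse_length)
--             start_pos = (start_pos + skip_size + reverse_length) % numbers_length
--             skip_size += 1
--     return numbers
-- ===== SOURCE B (Python) =====
-- def _rotated_reverse(numbers, start_pos, reverse_length):
--     """Reverse the cyclic segment by rotating it to the front, reversing a prefix, rotating back."""
--     n = len(numbers)
--     length = min(n, reverse_length)
--     if length <= 0:
--         return numbers[:]
--     rotated = numbers[start_pos:] + numbers[:start_pos]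
--     rotated = list(reversed(rotated[:length])) + rotated[length:]
--     k = n - start_pos
--     return rotated[k:] + rotated[:k]
--
-- def knot_hash(numbers, reverse_lengths, iterations=1):
--     """Apply knot hash to list of numbers for given iterations."""
--     start_pos = 0
--     skip_size = 0
--     n = len(numbers)
--     for _ in range(iterations):
--         for reverse_length in reverse_lengths:
--             numbers[:] = _rotated_reverse(numbers, start_pos, reverse_length)
--             start_pos = (start_pos + skip_size + reverse_length) % n
--             skip_size += 1
--     return numbers
-- ===== Notes on version B (the rewrite author's own statement) =====
-- stated objective: alternative
-- what changed: The inner cyclic reversal no longer swaps endpoint pairs inward with modular index pairs; B rotates the list so the segment starts at the front, reverses that prefix with the built-in reversed(), and rotates back; outer knot-hash state updates are unchanged.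
import Mathlib
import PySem

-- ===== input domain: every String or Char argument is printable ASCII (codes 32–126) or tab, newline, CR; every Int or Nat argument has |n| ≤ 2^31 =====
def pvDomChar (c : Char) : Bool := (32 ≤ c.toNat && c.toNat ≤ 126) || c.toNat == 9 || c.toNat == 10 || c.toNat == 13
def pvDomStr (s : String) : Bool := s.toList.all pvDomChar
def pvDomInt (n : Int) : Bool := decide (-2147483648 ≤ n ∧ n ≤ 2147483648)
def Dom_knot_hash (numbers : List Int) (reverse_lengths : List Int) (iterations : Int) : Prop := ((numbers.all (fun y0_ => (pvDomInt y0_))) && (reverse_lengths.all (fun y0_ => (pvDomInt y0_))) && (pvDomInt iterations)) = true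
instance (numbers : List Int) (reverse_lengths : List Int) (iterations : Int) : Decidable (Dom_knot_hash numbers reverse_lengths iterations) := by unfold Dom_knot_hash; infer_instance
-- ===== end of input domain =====

-- B replaces A's inner endpoint-swap loop by rotate-to-front / reverse-a-prefix / rotate-back (objective:
-- simpler).  Both Pythons mutate `numbers` in place and return it; the equivalence proved here is about the
-- return value (B performs the same in-place mutation via `numbers[:] = ...`).

-- ===== PORT A =====
-- helper `reverse` of Source A; `int(length / 2)` is truncating division, exact here since |length| ≤ 2^31 < 2^53.
-- The pyGetD/pySetD total forms are exact: whenever the loop body runs, list_length > 0 and both indices are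
-- `% list_length` of nonnegative numbers, hence in range (Python never raises there).
def pyReverse (numbers : List Int) (start_pos : Int) (length0 : Int) : List Int :=
  let list_length : Int := numbers.length
  let length : Int := min list_length length0
  let switch_length : Int := PySem.Int.truncdiv length 2
  (PySem.List.pyRange 0 switch_length 1).foldl (fun xs index_to_switch =>
    let to_switch := PySem.Int.mod (start_pos + index_to_switch) list_length
    let switch := PySem.Int.mod (start_pos + length - 1 - index_to_switch) list_length
    let rhs1 := PySem.List.pyGetD xs switch 0
    let rhs2 := PySem.List.pyGetD xs to_switch 0
    PySem.List.pySetD (PySem.List.pySetD xs to_switch rhs1) switch rhs2) numbers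

def knot_hash (numbers : List Int) (reverse_lengths : List Int) (iterations : Int) : List Int :=
  let numbers_length : Int := numbers.length
  ((PySem.List.pyRange 0 iterations 1).foldl (fun st _ =>
    reverse_lengths.foldl (fun (st : List Int × Int × Int) reverse_length =>
      (pyReverse st.1 st.2.1 reverse_length,
       PySem.Int.mod (st.2.1 + st.2.2 + reverse_length) numbers_length,
       st.2.2 + 1)) st) (numbers, 0, 0)).1

-- ===== PORT B =====
-- helper `_rotated_reverse` of Source B: rotate so the segment starts at the front, reverse its prefix, rotate back.
def rotatedReverse (numbers : List Int) (start_pos : Int) (reverse_length : Int) : List Int :=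
  let n : Int := numbers.length
  let length : Int := min n reverse_length
  if length ≤ 0 then numbers
  else
    let rotated := PySem.List.slice numbers (some start_pos) none ++ PySem.List.slice numbers none (some start_pos)
    let rotated2 := (PySem.List.slice rotated none (some length)).reverse ++ PySem.List.slice rotated (some length) none
    let k := n - start_pos
    PySem.List.slice rotated2 (some k) none ++ PySem.List.slice rotated2 none (some k)

def knot_hash_alt (numbers : List Int) (reverse_lengths : List Int) (iterations : Int) : List Int :=
  let n : Int := numbers.length
  ((PySem.List.pyRange 0 iterations 1).foldl (fun st _ =>
    reverse_lengths.foldl (fun (st : List Int × Int × Int) reverse_length =>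
      (rotatedReverse st.1 st.2.1 reverse_length,
       PySem.Int.mod (st.2.1 + st.2.2 + reverse_length) n,
       st.2.2 + 1)) st) (numbers, 0, 0)).1

-- ===== PRECONDITION & SPEC =====
-- Pre_ excludes exactly the inputs where Python A raises ZeroDivisionError: an empty `numbers` while the
-- inner loop body runs at least once (`start_pos % 0`).  B raises the same exception there.
def Pre_knot_hash (numbers : List Int) (reverse_lengths : List Int) (iterations : Int) : Prop :=
  numbers ≠ [] ∨ reverse_lengths = [] ∨ iterations ≤ 0
instance (numbers : List Int) (reverse_lengths : List Int) (iterations : Int) : Decidable (Pre_knot_hash numbers reverse_lengths iterations) := by unfold Pre_knot_hash; infer_instance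
def pvWitness_knot_hash : List Int × List Int × Int := ([0, 1, 2, 3, 4], [3, 4, 1, 5], 2)

def Spec_knot_hash (numbers : List Int) (reverse_lengths : List Int) (iterations : Int) (out : List Int) : Prop := out = knot_hash_alt numbers reverse_lengths iterations
instance (numbers : List Int) (reverse_lengths : List Int) (iterations : Int) (out : List Int) : Decidable (Spec_knot_hash numbers reverse_lengths iterations out) := by unfold Spec_knot_hash; infer_instance

-- ===== CLAIM (what is proved, stated in full; the proofs are below) =====
def Claim_equal_knot_hash : Prop := ∀ (numbers : List Int) (reverse_lengths : List Int) (iterations : Int), Dom_knot_hash numbers reverse_lengths iterations → Pre_knot_hash numbers reverse_lengths iterations → Spec_knot_hash numbers reverse_lengths iterations (knot_hash numbers reverse_lengths iterations)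

-- ===== LEMMAS AND PROOFS =====

-- proof-side view of A's loop body: a straight swap on the rotated list
def swapN (l : List Int) (i j : Nat) : List Int := (l.set i (l.getD j 0)).set j (l.getD i 0)

def swapIter (l : List Int) (Ln : Nat) (j : Nat) : List Int :=
  (List.range j).foldl (fun t i => swapN t i (Ln - 1 - i)) l

def revFirst (Ln : Nat) (l : List Int) : List Int := (l.take Ln).reverse ++ l.drop Ln

lemma length_swapN (l : List Int) (i j : Nat) : (swapN l i j).length = l.length := by simp [swapN]

lemma mod_two_cases {a n : Nat} (_hn : 0 < n) (ha : a < 2 * n) :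
    a % n = if a < n then a else a - n := by
  split_ifs with h
  · exact Nat.mod_eq_of_lt h
  · rw [Nat.mod_eq_sub_mod (by omega)]
    exact Nat.mod_eq_of_lt (by omega)

lemma cyc_cancel {n p i : Nat} (hn : 0 < n) (hp : p < n) (hi : i < n) :
    ((p + i) % n + (n - p)) % n = i := by
  have h1 : (p + i) % n = if p + i < n then p + i else p + i - n := mod_two_cases hn (by omega)
  rw [h1]
  rw [mod_two_cases hn (by split_ifs <;> omega)]
  split_ifs <;> omega

lemma cyc_iff {n p i q : Nat} (hn : 0 < n) (hp : p < n) (hi : i < n) (hq : q < n) :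
    q = (p + i) % n ↔ (q + (n - p)) % n = i := by
  have h1 : (p + i) % n = if p + i < n then p + i else p + i - n := mod_two_cases hn (by omega)
  have h2 : (q + (n - p)) % n = if q + (n - p) < n then q + (n - p) else q + (n - p) - n :=
    mod_two_cases hn (by omega)
  rw [h1, h2]
  split_ifs <;> omega

lemma getD_swapN (l : List Int) (i j q : Nat) (hq : q < l.length) :
    (swapN l i j).getD q 0 = if q = j then l.getD i 0 else if q = i then l.getD j 0 else l.getD q 0 := by
  rw [List.getD_eq_getElem _ _ (by simpa [length_swapN] using hq)]
  simp only [swapN, List.getElem_set]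
  split_ifs <;> first | rfl | omega | (rw [List.getD_eq_getElem _ _ hq])

lemma getD_rotate (l : List Int) (k q : Nat) (hn : 0 < l.length) (hq : q < l.length) :
    (l.rotate k).getD q 0 = l.getD ((q + k) % l.length) 0 := by
  rw [List.getD_eq_getElem _ _ (by simpa using hq), List.getD_eq_getElem _ _ (Nat.mod_lt _ hn)]
  exact List.getElem_rotate l k q _

lemma swap_conj (u : List Int) (p i j : Nat) (hp : p < u.length)
    (hi : i < u.length) (hj : j < u.length) :
    swapN (u.rotate (u.length - p)) ((p + i) % u.length) ((p + j) % u.length)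
      = (swapN u i j).rotate (u.length - p) := by
  have hn : 0 < u.length := by omega
  apply List.ext_getElem (by simp [length_swapN])
  intro q h1 h2
  have hq : q < u.length := by simpa [length_swapN] using h1
  rw [← List.getD_eq_getElem _ 0 h1, ← List.getD_eq_getElem _ 0 h2]
  rw [getD_swapN _ ((p+i)%u.length) ((p+j)%u.length) q (by simpa using hq)]
  rw [getD_rotate u (u.length - p) q hn hq]
  rw [getD_rotate u (u.length - p) ((p+i)%u.length) hn (Nat.mod_lt _ hn)]
  rw [getD_rotate u (u.length - p) ((p+j)%u.length) hn (Nat.mod_lt _ hn)]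
  rw [getD_rotate (swapN u i j) (u.length - p) q (by simpa [length_swapN] using hn) (by simpa [length_swapN] using hq)]
  rw [length_swapN]
  rw [getD_swapN u i j _ (Nat.mod_lt _ hn)]
  rw [cyc_cancel hn hp hi, cyc_cancel hn hp hj]
  have e1 : (q = (p + j) % u.length) ↔ ((q + (u.length - p)) % u.length = j) := cyc_iff hn hp hj hq
  have e2 : (q = (p + i) % u.length) ↔ ((q + (u.length - p)) % u.length = i) := cyc_iff hn hp hi hq
  split_ifs with a b c d e f <;> tauto
lemma length_swapIter (l : List Int) (Ln j : Nat) : (swapIter l Ln j).length = l.length := by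
  induction j with
  | zero => simp [swapIter]
  | succ j ih =>
    simp only [swapIter, List.range_succ, List.foldl_append, List.foldl_cons, List.foldl_nil] at *
    simp [length_swapN, ih]

lemma swapIter_getD (l : List Int) (Ln j : Nat) (h2j : 2 * j ≤ Ln) (hLn : Ln ≤ l.length) :
    ∀ q, q < l.length →
      (swapIter l Ln j).getD q 0 =
        if q < j ∨ (Ln - j ≤ q ∧ q < Ln) then l.getD (Ln - 1 - q) 0 else l.getD q 0 := by
  induction j with
  | zero =>
    intro q hq
    rw [if_neg (by omega)]
    simp [swapIter]
  | succ j ih =>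
    intro q hq
    have hstep : swapIter l Ln (j+1) = swapN (swapIter l Ln j) j (Ln - 1 - j) := by
      simp only [swapIter, List.range_succ, List.foldl_append, List.foldl_cons, List.foldl_nil]
    rw [hstep, getD_swapN _ _ _ _ (by rw [length_swapIter]; exact hq)]
    rw [ih (by omega) j (by omega), ih (by omega) (Ln - 1 - j) (by omega), ih (by omega) q hq]
    split_ifs <;> first | (congr 1; omega) | omega
lemma length_revFirst (Ln : Nat) (l : List Int) (h : Ln ≤ l.length) :
    (revFirst Ln l).length = l.length := by
  simp [revFirst]; omega

lemma swapIter_eq_revFirst (l : List Int) (Ln : Nat) (hLn : Ln ≤ l.length) :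
    swapIter l Ln (Ln / 2) = revFirst Ln l := by
  apply List.ext_getElem (by rw [length_swapIter, length_revFirst _ _ hLn])
  intro q h1 h2
  have hq : q < l.length := by rwa [length_swapIter] at h1
  rw [← List.getD_eq_getElem _ 0 h1, ← List.getD_eq_getElem _ 0 h2]
  rw [swapIter_getD l Ln (Ln / 2) (by omega) hLn q hq]
  by_cases hcase : q < Ln
  · have hrev : (revFirst Ln l).getD q 0 = l.getD (Ln - 1 - q) 0 := by
      rw [List.getD_eq_getElem _ 0 (by rw [length_revFirst _ _ hLn]; exact hq)]
      rw [List.getD_eq_getElem _ 0 (by omega)]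
      have hlen : ((l.take Ln).reverse).length = Ln := by simp; omega
      simp only [revFirst]
      rw [List.getElem_append_left (by omega)]
      rw [List.getElem_reverse]
      simp only [List.getElem_take]
      congr 1
      simp; omega
    rw [hrev]
    split_ifs with h
    · rfl
    · congr 1; omega
  · rw [if_neg (by omega)]
    rw [List.getD_eq_getElem (revFirst Ln l) 0 (by rw [length_revFirst _ _ hLn]; exact hq)]
    rw [List.getD_eq_getElem l 0 hq]
    have hlen : ((l.take Ln).reverse).length = Ln := by simp; omega
    simp only [revFirst]
    rw [List.getElem_append_right (by omega)]
    simp only [List.getElem_drop]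
    congr 1
    omega
lemma truncdiv_natCast_two (m : Nat) : PySem.Int.truncdiv (m:Int) 2 = ((m/2 : Nat):Int) := by
  show Int.tdiv _ _ = _
  rw [Int.tdiv_eq_ediv_of_nonneg (by positivity)]; push_cast; rfl

lemma rotate_back (xs : List Int) (p : Nat) (hp : p ≤ xs.length) :
    (xs.rotate p).rotate (xs.length - p) = xs := by
  rw [List.rotate_rotate]
  have : p + (xs.length - p) = xs.length := by omega
  rw [this, List.rotate_length]

lemma pyReverse_eq_rot (xs : List Int) (sp L : Int) (h0 : 0 ≤ sp) (h1 : sp < (xs.length:Int))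
    (hL : 1 ≤ min (xs.length:Int) L) :
    pyReverse xs sp L
      = (revFirst ((min (xs.length:Int) L).toNat) (xs.rotate sp.toNat)).rotate
          (xs.length - sp.toNat) := by
  set n := xs.length with hn
  set p := sp.toNat with hpdef
  set Ln := (min (n:Int) L).toNat with hLndef
  have hsp : sp = (p:Int) := by omega
  have hLc : min (n:Int) L = (Ln:Int) := by omega
  have hLn_le : Ln ≤ n := by omega
  have hp : p < n := by omega
  have hnpos : 0 < n := by omega
  have hys : (xs.rotate p).length = n := by simp [hn]
  rw [← swapIter_eq_revFirst _ _ (by omega)]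
  show (PySem.List.pyRange 0 (PySem.Int.truncdiv (min (n:Int) L) 2) 1).foldl _ xs = _
  rw [hLc, truncdiv_natCast_two, PySem.List.pyRange_one]
  have hcnt : (((Ln/2 : Nat) : Int) - 0).toNat = Ln/2 := by omega
  rw [hcnt, List.foldl_map]
  have aux : ∀ j, j ≤ Ln/2 →
      (List.range j).foldl (fun (t : List Int) (k : Nat) =>
        let to_switch := PySem.Int.mod (sp + ((0:Int) + (k:Int))) ((xs.length:Nat):Int)
        let switch := PySem.Int.mod (sp + (Ln:Int) - 1 - ((0:Int) + (k:Int))) ((xs.length:Nat):Int)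
        let rhs1 := PySem.List.pyGetD t switch 0
        let rhs2 := PySem.List.pyGetD t to_switch 0
        PySem.List.pySetD (PySem.List.pySetD t to_switch rhs1) switch rhs2) xs
      = (swapIter (xs.rotate p) Ln j).rotate (n - p) := by
    intro j hj
    induction j with
    | zero =>
      simp only [List.range_zero, List.foldl_nil, swapIter, List.foldl_nil]
      rw [rotate_back xs p (by omega)]
    | succ j ih =>
      rw [List.range_succ, List.foldl_append, List.foldl_cons, List.foldl_nil]
      rw [ih (by omega)]
      have e1 : sp + ((0:Int) + (j:Int)) = (((p + j : Nat)):Int) := by omega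
      have e2 : sp + (Ln:Int) - 1 - ((0:Int) + (j:Int)) = (((p + (Ln - 1 - j) : Nat)):Int) := by
        omega
      simp only [e1, e2, PySem.Int.mod_natCast, PySem.List.pyGetD_natCast, PySem.List.pySetD_natCast]
      have hbody : ∀ (t : List Int) (a b : Nat),
          (t.set a (t.getD b 0)).set b (t.getD a 0) = swapN t a b := fun _ _ _ => rfl
      rw [hbody]
      have hu : (swapIter (xs.rotate p) Ln j).length = n := by rw [length_swapIter, hys]
      have hconj := swap_conj (swapIter (xs.rotate p) Ln j) p j (Ln - 1 - j)
        (by rw [hu]; omega) (by rw [hu]; omega) (by rw [hu]; omega)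
      rw [hu] at hconj
      rw [hconj]
      have hstep : swapN (swapIter (xs.rotate p) Ln j) j (Ln - 1 - j)
          = swapIter (xs.rotate p) Ln (j+1) := by
        simp only [swapIter, List.range_succ, List.foldl_append, List.foldl_cons, List.foldl_nil]
      rw [hstep]
  exact aux (Ln/2) le_rfl
lemma rotatedReverse_eq_rot (xs : List Int) (sp L : Int) (h0 : 0 ≤ sp) (h1 : sp < (xs.length:Int))
    (hL : 1 ≤ min (xs.length:Int) L) :
    rotatedReverse xs sp L
      = (revFirst ((min (xs.length:Int) L).toNat) (xs.rotate sp.toNat)).rotate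
          (xs.length - sp.toNat) := by
  set n := xs.length with hn
  set p := sp.toNat with hpdef
  set Ln := (min (n:Int) L).toNat with hLndef
  have hLc : min (n:Int) L = (Ln:Int) := by omega
  have hp : p < n := by omega
  show (if min (n:Int) L ≤ 0 then xs else _) = _
  rw [if_neg (by omega)]
  rw [PySem.List.slice_from xs h0, PySem.List.slice_to xs h0]
  rw [← List.rotate_eq_drop_append_take (by omega)]
  have hys : (xs.rotate p).length = n := by simp [hn]
  rw [PySem.List.slice_to _ (by omega : (0:Int) ≤ min (n:Int) L)]
  rw [PySem.List.slice_from _ (by omega : (0:Int) ≤ min (n:Int) L)]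
  rw [hLc]
  have htn : ((Ln:Int)).toNat = Ln := by omega
  rw [htn]
  have hk0 : (0:Int) ≤ (n:Int) - sp := by omega
  rw [PySem.List.slice_from _ hk0, PySem.List.slice_to _ hk0]
  have hkn : ((n:Int) - sp).toNat = n - p := by omega
  rw [hkn]
  have hr2 : ((xs.rotate p).take Ln).reverse ++ (xs.rotate p).drop Ln
      = revFirst Ln (xs.rotate p) := rfl
  rw [hr2]
  rw [← List.rotate_eq_drop_append_take (by rw [length_revFirst _ _ (by omega)]; omega)]

lemma truncdiv_nonpos {a : Int} (h : a ≤ 0) : PySem.Int.truncdiv a 2 ≤ 0 := by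
  show Int.tdiv a 2 ≤ 0
  have h2 : (0:Int) ≤ (-a).tdiv 2 := Int.tdiv_nonneg (by omega) (by norm_num)
  rw [Int.neg_tdiv] at h2
  omega

lemma pyReverse_of_nonpos (xs : List Int) (sp L : Int) (hL : min (xs.length:Int) L ≤ 0) :
    pyReverse xs sp L = xs := by
  show (PySem.List.pyRange 0 (PySem.Int.truncdiv (min (xs.length:Int) L) 2) 1).foldl _ xs = xs
  rw [PySem.List.pyRange_one_eq_nil (truncdiv_nonpos hL)]
  rfl

lemma rotatedReverse_of_nonpos (xs : List Int) (sp L : Int) (hL : min (xs.length:Int) L ≤ 0) :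
    rotatedReverse xs sp L = xs := by
  show (if min (xs.length:Int) L ≤ 0 then xs else _) = xs
  rw [if_pos hL]

lemma reverse_eq (xs : List Int) (sp L : Int) (h0 : 0 ≤ sp) (h1 : sp < (xs.length:Int)) :
    pyReverse xs sp L = rotatedReverse xs sp L := by
  by_cases hL : min (xs.length:Int) L ≤ 0
  · rw [pyReverse_of_nonpos xs sp L hL, rotatedReverse_of_nonpos xs sp L hL]
  · rw [pyReverse_eq_rot xs sp L h0 h1 (by omega), rotatedReverse_eq_rot xs sp L h0 h1 (by omega)]

lemma length_pyReverse (xs : List Int) (sp L : Int) : (pyReverse xs sp L).length = xs.length := by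
  show ((PySem.List.pyRange 0 _ 1).foldl _ xs).length = xs.length
  refine List.foldlRecOn (motive := fun (t : List Int) => t.length = xs.length) _ _ rfl ?_
  intro t ht i _
  simp only [PySem.List.length_pySetD]
  exact ht
lemma foldl_inv_congr {σ α : Type} (I : σ → Prop) (f g : σ → α → σ)
    (hfg : ∀ s a, I s → f s a = g s a) (hf : ∀ s a, I s → I (f s a)) :
    ∀ (l : List α) (s : σ), I s → l.foldl f s = l.foldl g s := by
  intro l
  induction l with
  | nil => intro s _; rfl
  | cons a l ih =>
    intro s hs
    simp only [List.foldl_cons]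
    rw [← hfg s a hs]
    exact ih _ (hf s a hs)

lemma foldl_inv {σ α : Type} (I : σ → Prop) (f : σ → α → σ)
    (hf : ∀ s a, I s → I (f s a)) : ∀ (l : List α) (s : σ), I s → I (l.foldl f s) := by
  intro l
  induction l with
  | nil => exact fun s hs => hs
  | cons a l ih => exact fun s hs => ih _ (hf s a hs)

theorem main_eq (numbers rls : List Int) (iters : Int) :
    knot_hash numbers rls iters = knot_hash_alt numbers rls iters := by
  simp only [knot_hash, knot_hash_alt]
  by_cases hn : numbers.length = 0
  · have hnil : numbers = [] := List.length_eq_zero_iff.mp hn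
    subst hnil
    have hstep : ∀ (st : List Int × Int × Int) (rl : Int), st.1 = [] →
        (pyReverse st.1 st.2.1 rl, PySem.Int.mod (st.2.1 + st.2.2 + rl) (((([]:List Int).length):Nat):Int), st.2.2 + 1)
        = (rotatedReverse st.1 st.2.1 rl, PySem.Int.mod (st.2.1 + st.2.2 + rl) (((([]:List Int).length):Nat):Int), st.2.2 + 1) := by
      rintro ⟨t, sp, ss⟩ rl ht
      simp only at ht
      subst ht
      rw [pyReverse_of_nonpos _ _ _ (by simp), rotatedReverse_of_nonpos _ _ _ (by simp)]
    have hpres : ∀ (st : List Int × Int × Int) (rl : Int), st.1 = [] →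
        ((pyReverse st.1 st.2.1 rl, PySem.Int.mod (st.2.1 + st.2.2 + rl) (((([]:List Int).length):Nat):Int), st.2.2 + 1) : List Int × Int × Int).1 = [] := by
      rintro ⟨t, sp, ss⟩ rl ht
      simp only at ht ⊢
      subst ht
      rw [pyReverse_of_nonpos _ _ _ (by simp)]
    refine congrArg Prod.fst (foldl_inv_congr (fun (st : List Int × Int × Int) => st.1 = []) _ _ ?_ ?_ _ _ rfl)
    · intro st _ hst
      exact foldl_inv_congr _ _ _ hstep hpres rls st hst
    · intro st _ hst
      exact foldl_inv _ _ hpres rls st hst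
  · have hpos : (0:Int) < (numbers.length:Int) := by exact_mod_cast Nat.pos_of_ne_zero hn
    set I := fun (st : List Int × Int × Int) =>
      st.1.length = numbers.length ∧ 0 ≤ st.2.1 ∧ st.2.1 < (numbers.length:Int) with hI
    have hstep : ∀ (st : List Int × Int × Int) (rl : Int), I st →
        (pyReverse st.1 st.2.1 rl, PySem.Int.mod (st.2.1 + st.2.2 + rl) ((numbers.length:Nat):Int), st.2.2 + 1)
        = (rotatedReverse st.1 st.2.1 rl, PySem.Int.mod (st.2.1 + st.2.2 + rl) ((numbers.length:Nat):Int), st.2.2 + 1) := by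
      rintro ⟨t, sp, ss⟩ rl ⟨hl, h2, h3⟩
      simp only at hl h2 h3 ⊢
      rw [reverse_eq t sp rl h2 (by rw [hl]; exact h3)]
    have hpres : ∀ (st : List Int × Int × Int) (rl : Int), I st →
        I (pyReverse st.1 st.2.1 rl, PySem.Int.mod (st.2.1 + st.2.2 + rl) ((numbers.length:Nat):Int), st.2.2 + 1) := by
      rintro ⟨t, sp, ss⟩ rl ⟨hl, h2, h3⟩
      refine ⟨?_, ?_, ?_⟩
      · simp only [length_pyReverse]; exact hl
      · exact PySem.Int.mod_nonneg _ hpos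
      · exact PySem.Int.mod_lt _ hpos
    refine congrArg Prod.fst (foldl_inv_congr I _ _ ?_ ?_ _ _ ⟨rfl, le_rfl, hpos⟩)
    · intro st _ hst
      exact foldl_inv_congr I _ _ hstep hpres rls st hst
    · intro st _ hst
      exact foldl_inv I _ hpres rls st hst

-- ===== VERDICT (by name: the statement is the Claim_ definition above) =====
theorem knot_hash_spec : Claim_equal_knot_hash := by
  intro numbers reverse_lengths iterations _ _
  exact main_eq numbers reverse_lengths iterations
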